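-- pv_equiv track=rewrite | github.com/Karan-J/leetcode | leetcode-2022/NextGreatestLetter.py | binNextGreatestLetter
-- ===== SOURCE A (Python) =====
-- def binNextGreatestLetter(letters, target):
--     left = 0
--     right = len(letters)
--
--     while left < right:
--         mid = left + (right - left) // 2
--         if target < letters[mid]:
--             right = mid
--         else:
--             left = mid + 1
--
--     return letters[left % len(letters)]
-- ===== SOURCE B (Python) =====
-- def binNextGreatestLetter(letters, target):
--     # Divide-and-conquer on list slices: compute the insertion index of the
--     # first letter strictly greater than target, then wrap to the front.
--     def bisect(xs):
--         if not xs: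
--             return 0
--         mid = len(xs) // 2
--         if target < xs[mid]:
--             return bisect(xs[:mid])
--         return mid + 1 + bisect(xs[mid + 1:])
--
--     i = bisect(letters)
--     return letters[i] if i < len(letters) else letters[0]
-- ===== Notes on version B (the rewrite author's own statement) =====
-- stated objective: alternative
-- what changed: Replaces the in-place two-pointer while-loop binary search with a recursive divide-and-conquer over list slices that returns an insertion index, then wraps explicitly to the front element instead of indexing with left % len.
-- outside the precondition, e.g. on binNextGreatestLetter([], 'a'): A raises ZeroDivisionError, B raises IndexError
import Mathlib
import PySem

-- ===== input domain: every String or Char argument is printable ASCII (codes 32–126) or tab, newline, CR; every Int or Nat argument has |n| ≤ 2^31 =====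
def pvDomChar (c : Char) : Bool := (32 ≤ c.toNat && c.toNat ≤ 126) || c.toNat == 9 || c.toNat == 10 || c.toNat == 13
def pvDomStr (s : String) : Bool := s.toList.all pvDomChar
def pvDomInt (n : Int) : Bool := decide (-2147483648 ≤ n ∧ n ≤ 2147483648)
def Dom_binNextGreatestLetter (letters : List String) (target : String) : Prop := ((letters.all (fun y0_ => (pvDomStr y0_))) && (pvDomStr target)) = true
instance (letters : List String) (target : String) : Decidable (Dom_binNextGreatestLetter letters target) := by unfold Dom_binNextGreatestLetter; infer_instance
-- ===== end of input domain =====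

-- B replaces A's iterative two-pointer binary search by a recursive divide-and-conquer
-- over list slices (objective: alternative, same results, not claimed faster).

-- ===== PORT A =====
-- A's while loop over (left, right); mid = left + (right-left)//2 is inlined.
-- letters[mid] is in range (left ≤ mid < right ≤ len) in every call reachable from
-- A's entry, so getD "" is exact there.
def binLoop (letters : List String) (target : String) (left right : Nat) : Nat :=
  if _h : left < right then
    if target < letters.getD (left + (right - left) / 2) "" then
      binLoop letters target left (left + (right - left) / 2)
    else
      binLoop letters target (left + (right - left) / 2 + 1) right
  else left
termination_by right - left
decreasing_by
  · have : (right - left) / 2 < right - left := Nat.div_lt_self (by omega) (by norm_num)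
    omega
  · omega

-- letters[left % len(letters)]: Python raises ZeroDivisionError on letters = [],
-- excluded by Pre_; for letters ≠ [] the index is in range and getD "" is exact.
def binNextGreatestLetter (letters : List String) (target : String) : String :=
  letters.getD (binLoop letters target 0 letters.length % letters.length) ""

-- ===== PORT B =====
-- Source B's recursive bisect on slices; mid = len(xs)//2 is inlined; xs[:mid] = take,
-- xs[mid+1:] = drop (exact, as 0 ≤ mid ≤ len xs); xs[mid] is in range when xs ≠ [].
def bisectAlt (target : String) (xs : List String) : Nat :=
  if h : xs.isEmpty then 0
  else
    if target < xs.getD (xs.length / 2) "" then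
      bisectAlt target (xs.take (xs.length / 2))
    else
      xs.length / 2 + 1 + bisectAlt target (xs.drop (xs.length / 2 + 1))
termination_by xs.length
decreasing_by
  · have hx : xs.length ≠ 0 := by simpa [List.isEmpty_iff_length_eq_zero] using h
    have : xs.length / 2 < xs.length := Nat.div_lt_self (by omega) (by norm_num)
    simp [List.length_take]; omega
  · have hx : xs.length ≠ 0 := by simpa [List.isEmpty_iff_length_eq_zero] using h
    simp [List.length_drop]; omega

def binNextGreatestLetter_alt (letters : List String) (target : String) : String :=
  let i := bisectAlt target letters
  if i < letters.length then letters.getD i "" else letters.getD 0 ""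

-- ===== PRECONDITION & SPEC =====
-- Pre_ excludes only the empty list, on which the Python A raises ZeroDivisionError
-- (left % len(letters)) and B raises IndexError.
def Pre_binNextGreatestLetter (letters : List String) (target : String) : Prop := letters ≠ []
instance (letters : List String) (target : String) : Decidable (Pre_binNextGreatestLetter letters target) := by unfold Pre_binNextGreatestLetter; infer_instance
def pvWitness_binNextGreatestLetter : List String × String := (["c", "f", "j"], "a")

def Spec_binNextGreatestLetter (letters : List String) (target : String) (out : String) : Prop := out = binNextGreatestLetter_alt letters target
instance (letters : List String) (target : String) (out : String) : Decidable (Spec_binNextGreatestLetter letters target out) := by unfold Spec_binNextGreatestLetter; infer_instance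

-- ===== CLAIM (what is proved, stated in full; the proofs are below) =====
def Claim_equal_binNextGreatestLetter : Prop := ∀ (letters : List String) (target : String), Dom_binNextGreatestLetter letters target → Pre_binNextGreatestLetter letters target → Spec_binNextGreatestLetter letters target (binNextGreatestLetter letters target)

-- ===== LEMMAS AND PROOFS =====

-- B's insertion index never exceeds the length of the list it searches.
lemma bisectAlt_le (target : String) (xs : List String) : bisectAlt target xs ≤ xs.length := by
  fun_induction bisectAlt target xs with
  | case1 => exact Nat.zero_le _
  | case2 xs h hlt ih =>
      have h1 : (xs.take (xs.length / 2)).length ≤ xs.length / 2 := by simp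
      have h2 : xs.length / 2 ≤ xs.length := Nat.div_le_self _ _
      omega
  | case3 xs h hlt ih =>
      have h1 : (xs.drop (xs.length / 2 + 1)).length = xs.length - (xs.length / 2 + 1) := by simp
      have hx : xs.length ≠ 0 := by simpa [List.isEmpty_iff_length_eq_zero] using h
      omega

-- indexing into the slice letters[a : a+n] is indexing into letters
lemma getD_slice (l : List String) (a n i : Nat) (hi : i < n) :
    ((l.drop a).take n).getD i "" = l.getD (a + i) "" := by
  have h1 : ((l.drop a).take n)[i]? = l[a + i]? := by
    rw [List.getElem?_take_of_lt hi, List.getElem?_drop]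
  simp [List.getD, h1]

-- loop invariant: A's loop started at (left, right) lands on
-- left + (B's insertion index within the slice letters[left:right])
lemma loop_eq_bisect (letters : List String) (target : String) :
    ∀ k left right, right - left ≤ k → left ≤ right → right ≤ letters.length →
      binLoop letters target left right =
        left + bisectAlt target ((letters.drop left).take (right - left)) := by
  intro k
  induction k with
  | zero =>
      intro left right h1 h2 _
      have : left = right := by omega
      subst this
      rw [binLoop, bisectAlt]
      simp
  | succ k ih =>
      intro left right h1 h2 h3
      by_cases hlr : left < right
      · have hslen : ((letters.drop left).take (right - left)).length = right - left := by
          simp [List.length_take, List.length_drop]; omega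
        have hne : ¬ ((letters.drop left).take (right - left)).isEmpty = true := by
          simp; omega
        have hmidlt : (right - left) / 2 < right - left := Nat.div_lt_self (by omega) (by norm_num)
        have hget : ((letters.drop left).take (right - left)).getD
              (((letters.drop left).take (right - left)).length / 2) "" =
            letters.getD (left + (right - left) / 2) "" := by
          rw [hslen]
          exact getD_slice letters left (right - left) ((right - left) / 2) hmidlt
        rw [binLoop, bisectAlt, dif_pos hlr, dif_neg hne, hget]
        by_cases hc : target < letters.getD (left + (right - left) / 2) ""
        · rw [if_pos hc, if_pos hc]
          rw [ih left (left + (right - left) / 2) (by omega) (by omega) (by omega)]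
          congr 2
          rw [List.take_take, hslen]
          congr 1
          omega
        · rw [if_neg hc, if_neg hc]
          rw [ih (left + (right - left) / 2 + 1) right (by omega) (by omega) h3]
          have hdrop : ((letters.drop left).take (right - left)).drop
                (((letters.drop left).take (right - left)).length / 2 + 1) =
              (letters.drop (left + (right - left) / 2 + 1)).take
                (right - (left + (right - left) / 2 + 1)) := by
            have e1 : right - left - ((right - left) / 2 + 1) =
                right - (left + (right - left) / 2 + 1) := by omega
            have e2 : left + ((right - left) / 2 + 1) = left + (right - left) / 2 + 1 := by omega
            rw [hslen, List.drop_take, List.drop_drop, e1, e2]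
          rw [hdrop, hslen]
          omega
      · have : left = right := by omega
        subst this
        rw [binLoop, bisectAlt]
        simp

-- ===== VERDICT (by name: the statement is the Claim_ definition above) =====
theorem binNextGreatestLetter_spec : Claim_equal_binNextGreatestLetter := by
  intro letters target _hdom hpre
  unfold Spec_binNextGreatestLetter binNextGreatestLetter binNextGreatestLetter_alt
  have hlen : 0 < letters.length := List.length_pos_of_ne_nil hpre
  have hloop : binLoop letters target 0 letters.length = bisectAlt target letters := by
    have := loop_eq_bisect letters target letters.length 0 letters.length (by omega) (by omega) (by omega)
    simpa using this
  rw [hloop]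
  have hle : bisectAlt target letters ≤ letters.length := bisectAlt_le target letters
  by_cases h : bisectAlt target letters < letters.length
  · rw [if_pos h, Nat.mod_eq_of_lt h]
  · have heq : bisectAlt target letters = letters.length := by omega
    rw [if_neg h, heq, Nat.mod_self]
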